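-- pv_equiv track=rewrite | github.com/IControlP/Cash-Pedal-v1.02.3 | maintenance/maintenance_utils.py | _categorize_service
-- ===== SOURCE A (Python) =====
-- def _categorize_service(service_type: str) -> str:
--     """Categorize service type for sorting and display"""
--     if 'oil' in service_type:
--         return 'Oil & Fluids'
--     elif any(x in service_type for x in ['tire', 'brake', 'shock', 'strut']):
--         return 'Wear Components'
--     elif any(x in service_type for x in ['spark', 'timing', 'belt', 'water_pump']):
--         return 'Major Service'
--     elif any(x in service_type for x in ['filter', 'wiper', 'inspection']):
--         return 'Basic Maintenance'
--     elif any(x in service_type for x in ['ev_', 'hybrid_', 'high_voltage']):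
--         return 'Electric/Hybrid'
--     else:
--         return 'Other'
-- ===== SOURCE B (Python) =====
-- _KEYWORD_PRIORITY = {
--     'oil': 0,
--     'tire': 1, 'brake': 1, 'shock': 1, 'strut': 1,
--     'spark': 2, 'timing': 2, 'belt': 2, 'water_pump': 2,
--     'filter': 3, 'wiper': 3, 'inspection': 3,
--     'ev_': 4, 'hybrid_': 4, 'high_voltage': 4,
-- }
-- _CATEGORIES = ['Oil & Fluids', 'Wear Components', 'Major Service',
--                'Basic Maintenance', 'Electric/Hybrid', 'Other']
--
--
-- def _categorize_service(service_type: str) -> str: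
--     """Categorize service type for sorting and display"""
--     best = len(_CATEGORIES) - 1
--     for kw, prio in _KEYWORD_PRIORITY.items():
--         if kw in service_type:
--             best = min(best, prio)
--     return _CATEGORIES[best]
-- ===== Notes on version B (the rewrite author's own statement) =====
-- stated objective: alternative
-- what changed: B replaces A's short-circuit if/elif chain of grouped membership tests by a single exhaustive pass over a flat keyword-to-priority map that aggregates the minimum matched priority and indexes a category table with it.
import Mathlib
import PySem

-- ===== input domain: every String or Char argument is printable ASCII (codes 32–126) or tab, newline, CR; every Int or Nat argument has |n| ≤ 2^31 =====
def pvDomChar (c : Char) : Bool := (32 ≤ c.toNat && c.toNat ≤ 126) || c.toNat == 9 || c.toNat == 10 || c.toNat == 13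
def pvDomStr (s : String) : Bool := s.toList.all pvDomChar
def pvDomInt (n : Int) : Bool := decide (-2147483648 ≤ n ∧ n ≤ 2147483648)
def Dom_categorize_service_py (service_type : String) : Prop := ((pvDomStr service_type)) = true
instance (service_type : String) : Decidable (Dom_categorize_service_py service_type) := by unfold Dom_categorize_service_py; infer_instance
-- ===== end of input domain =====

-- B replaces A's short-circuit if/elif chain by one exhaustive min-aggregation pass over a flat
-- keyword→priority map, then indexes a category table (alternative decomposition, same cost).

-- ===== PORT A =====
def categorize_service_py (service_type : String) : String :=
  if PySem.Str.isIn "oil" service_type then "Oil & Fluids"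
  else if ["tire", "brake", "shock", "strut"].any (fun x => PySem.Str.isIn x service_type) then "Wear Components"
  else if ["spark", "timing", "belt", "water_pump"].any (fun x => PySem.Str.isIn x service_type) then "Major Service"
  else if ["filter", "wiper", "inspection"].any (fun x => PySem.Str.isIn x service_type) then "Basic Maintenance"
  else if ["ev_", "hybrid_", "high_voltage"].any (fun x => PySem.Str.isIn x service_type) then "Electric/Hybrid"
  else "Other"

-- ===== PORT B =====
-- _KEYWORD_PRIORITY (insertion order of the Python dict)
def pvKeywordPrio : List (String × Int) :=
  [("oil", 0),
   ("tire", 1), ("brake", 1), ("shock", 1), ("strut", 1),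
   ("spark", 2), ("timing", 2), ("belt", 2), ("water_pump", 2),
   ("filter", 3), ("wiper", 3), ("inspection", 3),
   ("ev_", 4), ("hybrid_", 4), ("high_voltage", 4)]

def pvCategories : List String :=
  ["Oil & Fluids", "Wear Components", "Major Service",
   "Basic Maintenance", "Electric/Hybrid", "Other"]

def categorize_service_py_alt (service_type : String) : String :=
  let best : Int :=
    pvKeywordPrio.foldl
      (fun best kp => if PySem.Str.isIn kp.1 service_type then min best kp.2 else best)
      (pvCategories.length - 1 : Int)
  ((PySem.List.pyGet? pvCategories best).getD "")

-- ===== PRECONDITION & SPEC =====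
def Spec_categorize_service_py (service_type : String) (out : String) : Prop := out = categorize_service_py_alt service_type
instance (service_type : String) (out : String) : Decidable (Spec_categorize_service_py service_type out) := by unfold Spec_categorize_service_py; infer_instance

-- ===== CLAIM (what is proved, stated in full; the proofs are below) =====
def Claim_equal_categorize_service_py : Prop := ∀ (service_type : String), Dom_categorize_service_py service_type → Spec_categorize_service_py service_type (categorize_service_py service_type)

-- ===== LEMMAS AND PROOFS =====

-- fold of B's min-step over a constant-priority group = group-level 'any' test
theorem pv_grp (s : String) (p acc : Int) (ks : List String) :
    List.foldl (fun a (kp : String × Int) => if PySem.Str.isIn kp.1 s then min a kp.2 else a)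
      acc (ks.map (fun k => (k, p)))
    = if ks.any (fun k => PySem.Str.isIn k s) then min acc p else acc := by
  induction ks generalizing acc with
  | nil => simp
  | cons k rest ih =>
    simp only [List.map_cons, List.foldl_cons, List.any_cons]
    by_cases h : PySem.Str.isIn k s = true
    · rw [if_pos h, ih]
      simp only [h, Bool.true_or]
      rw [if_pos trivial]
      by_cases hr : (rest.any fun k => PySem.Str.isIn k s) = true
      · rw [if_pos hr, min_assoc, min_self]
      · rw [if_neg hr]
    · simp only [Bool.not_eq_true] at h
      simp only [h, Bool.false_or]
      rw [if_neg (by simp), ih]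

-- ===== VERDICT (by name: the statement is the Claim_ definition above) =====
theorem categorize_service_py_spec : Claim_equal_categorize_service_py := by
  intro s _
  show categorize_service_py s = categorize_service_py_alt s
  have hsplit : pvKeywordPrio
      = (["oil"].map (fun k => (k, (0 : Int))))
        ++ (["tire", "brake", "shock", "strut"].map (fun k => (k, (1 : Int))))
        ++ (["spark", "timing", "belt", "water_pump"].map (fun k => (k, (2 : Int))))
        ++ (["filter", "wiper", "inspection"].map (fun k => (k, (3 : Int))))
        ++ (["ev_", "hybrid_", "high_voltage"].map (fun k => (k, (4 : Int)))) := by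
    simp [pvKeywordPrio]
  unfold categorize_service_py categorize_service_py_alt
  rw [hsplit]
  rw [List.foldl_append, List.foldl_append, List.foldl_append, List.foldl_append,
      pv_grp, pv_grp, pv_grp, pv_grp, pv_grp]
  simp only [List.any_cons, List.any_nil, Bool.or_false]
  split_ifs <;> decide
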